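-- pv_equiv track=rewrite | github.com/kSiadat/cellular_automata_final_project | outer_db.py | check_growth
-- ===== SOURCE A (Python) =====
-- def check_growth(history):
--     up = False
--     flat = (history[1] == history[0])
--     fall = (history[1] < history[0])
--     for x in range(2, len(history)):
--         if history[x] > history[x-1]:
--             up = True
--         elif history[x] == history[x-1]:
--             flat = True
--         elif history[x] < history[x-1]:
--             fall = True
--     return up, flat, fall
-- ===== SOURCE B (Python) =====
-- def check_growth(history):
--     tail = history[1:]
--     up = tail != sorted(tail, reverse=True)
--     fall = history != sorted(history)
--     runs = []
--     for x in history: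
--         if not runs or runs[-1] != x:
--             runs.append(x)
--     flat = len(runs) < len(history)
--     return up, flat, fall
-- ===== Notes on version B (the rewrite author's own statement) =====
-- stated objective: alternative
-- what changed: Replaces A's indexed accumulator loop over comparisons by order-structure tests: up = history[1:] is not its own descending sort, fall = history is not its own ascending sort, flat = run-length deduplication of adjacent equal values shortens the list.
import Mathlib
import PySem

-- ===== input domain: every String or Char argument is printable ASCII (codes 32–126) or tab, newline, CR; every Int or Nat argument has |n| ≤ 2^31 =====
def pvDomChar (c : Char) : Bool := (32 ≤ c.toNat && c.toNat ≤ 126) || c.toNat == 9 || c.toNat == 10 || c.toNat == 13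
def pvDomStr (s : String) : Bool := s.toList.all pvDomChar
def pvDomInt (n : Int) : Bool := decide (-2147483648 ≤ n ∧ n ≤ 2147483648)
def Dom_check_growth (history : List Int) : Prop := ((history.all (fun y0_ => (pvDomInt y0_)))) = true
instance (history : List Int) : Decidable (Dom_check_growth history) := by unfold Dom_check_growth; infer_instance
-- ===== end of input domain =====

-- B detects up/flat/fall via order structure (sortedness tests and run-length
-- deduplication) instead of A's indexed comparison loop; return value only.

-- ===== PORT A =====
-- Indices in range(2, len) are in range, so history[x] is pyGetD (exact there);
-- history[1]/history[0] raise IndexError for len < 2 — excluded by Pre_check_growth.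
def check_growth (history : List Int) : Bool × Bool × Bool :=
  (PySem.List.pyRange 2 (history.length : Int) 1).foldl
    (fun (s : Bool × Bool × Bool) x =>
      let hx := PySem.List.pyGetD history x 0
      let hp := PySem.List.pyGetD history (x - 1) 0
      if hx > hp then (true, s.2.1, s.2.2)
      else if hx == hp then (s.1, true, s.2.2)
      else if hx < hp then (s.1, s.2.1, true)
      else s)
    (false,
     PySem.List.pyGetD history 1 0 == PySem.List.pyGetD history 0 0,
     decide (PySem.List.pyGetD history 1 0 < PySem.List.pyGetD history 0 0))

-- ===== PORT B =====
-- runs[-1] is read only when runs is nonempty (Python short-circuit), so pyGetD is exact.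
def check_growth_alt (history : List Int) : Bool × Bool × Bool :=
  let tail := PySem.List.slice history (some 1) none
  let up := !(tail == PySem.List.sorted tail (fun x => x) true)
  let fall := !(history == PySem.List.sorted history (fun x => x) false)
  let runs := history.foldl
    (fun (runs : List Int) x =>
      if runs == [] || !(PySem.List.pyGetD runs (-1) 0 == x) then runs ++ [x] else runs)
    []
  let flat := decide (runs.length < history.length)
  (up, flat, fall)

-- ===== PRECONDITION & SPEC =====
-- Pre_ excludes histories of length < 2, on which A raises IndexError (history[1]).
def Pre_check_growth (history : List Int) : Prop := 2 ≤ history.length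
instance (history : List Int) : Decidable (Pre_check_growth history) := by unfold Pre_check_growth; infer_instance
def pvWitness_check_growth : List Int := [3, 1, 1, 2]

def Spec_check_growth (history : List Int) (out : Bool × Bool × Bool) : Prop := out = check_growth_alt history
instance (history : List Int) (out : Bool × Bool × Bool) : Decidable (Spec_check_growth history out) := by unfold Spec_check_growth; infer_instance

-- ===== CLAIM =====
def Claim_equal_check_growth : Prop := ∀ (history : List Int), Dom_check_growth history → Pre_check_growth history → Spec_check_growth history (check_growth history)

-- ===== LEMMAS AND PROOFS =====

-- A's loop reads the pairs (history[x-1], history[x]) for x = 2 .. len-1; that is zip (drop 1) (drop 2).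
theorem pv_pairs_eq (xs : List Int) :
    (PySem.List.pyRange 2 (xs.length : Int) 1).map
      (fun x => (PySem.List.pyGetD xs (x - 1) 0, PySem.List.pyGetD xs x 0))
      = List.zip (xs.drop 1) (xs.drop 2) := by
  apply List.ext_getElem
  · simp [PySem.List.length_pyRange_one, List.length_zip]
    omega
  · intro k h1 h2
    have hk : k < xs.length - 2 := by
      have := h1
      simp [PySem.List.length_pyRange_one] at this
      omega
    rw [List.getElem_map, PySem.List.getElem_pyRange_one]
    rw [List.getElem_zip]
    have e1 : PySem.List.pyGetD xs ((2 : Int) + (k : Int) - 1) 0 = xs[(1 + k)]'(by omega) := by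
      have : ((2 : Int) + (k : Int) - 1) = ((1 + k : Nat) : Int) := by push_cast; ring
      rw [this, PySem.List.pyGetD_eq_getElem]
      all_goals try (congr 1)
      all_goals try push_cast
      all_goals omega
    have e2 : PySem.List.pyGetD xs ((2 : Int) + (k : Int)) 0 = xs[(2 + k)]'(by omega) := by
      have : ((2 : Int) + (k : Int)) = ((2 + k : Nat) : Int) := by push_cast; ring
      rw [this, PySem.List.pyGetD_eq_getElem]
      all_goals try (congr 1)
      all_goals try push_cast
      all_goals omega
    simp only [e1, e2, List.getElem_drop]

-- Fold of A's loop body over a list of pairs = three independent any-scans or-ed on the start state.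
theorem pv_fold_any (l : List (Int × Int)) (u f d : Bool) :
    l.foldl
      (fun (s : Bool × Bool × Bool) (p : Int × Int) =>
        if p.2 > p.1 then (true, s.2.1, s.2.2)
        else if p.2 == p.1 then (s.1, true, s.2.2)
        else if p.2 < p.1 then (s.1, s.2.1, true)
        else s)
      (u, f, d)
      = (u || l.any (fun p => p.2 > p.1),
         f || l.any (fun p => p.2 == p.1),
         d || l.any (fun p => p.2 < p.1)) := by
  induction l generalizing u f d with
  | nil => simp
  | cons p t ih =>
    rcases lt_trichotomy p.1 p.2 with h | h | h
    · have hne : (p.2 == p.1) = false := by simp; omega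
      simp only [List.foldl_cons, List.any_cons]
      rw [if_pos (by exact h)]
      rw [ih]
      simp [h, hne, not_lt.mpr (le_of_lt h)]
    · simp only [List.foldl_cons, List.any_cons]
      rw [if_neg (by omega), if_pos (by simp [h.symm])]
      rw [ih]
      simp [h]
    · have hne : (p.2 == p.1) = false := by simp; omega
      simp only [List.foldl_cons, List.any_cons]
      rw [if_neg (by omega), if_neg (by simp; omega), if_pos h]
      rw [ih]
      simp [h, hne, not_lt.mpr (le_of_lt h)]

-- IsChain → Pairwise for the two transitive orders used below
theorem pv_chain_pw_le {l : List Int} (h : List.IsChain (fun a b : Int => a ≤ b) l) :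
    l.Pairwise (fun a b : Int => a ≤ b) := by
  induction l with
  | nil => simp
  | cons a t ih =>
    cases t with
    | nil => simp
    | cons b t' =>
      rw [List.isChain_cons_cons] at h
      have hp := ih h.2
      refine List.pairwise_cons.mpr ⟨?_, hp⟩
      intro x hx
      rcases List.mem_cons.mp hx with rfl | hx
      · exact h.1
      · exact le_trans h.1 ((List.pairwise_cons.mp hp).1 x hx)

theorem pv_chain_pw_ge {l : List Int} (h : List.IsChain (fun a b : Int => b ≤ a) l) :
    l.Pairwise (fun a b : Int => b ≤ a) := by
  induction l with
  | nil => simp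
  | cons a t ih =>
    cases t with
    | nil => simp
    | cons b t' =>
      rw [List.isChain_cons_cons] at h
      have hp := ih h.2
      refine List.pairwise_cons.mpr ⟨?_, hp⟩
      intro x hx
      rcases List.mem_cons.mp hx with rfl | hx
      · exact h.1
      · exact le_trans ((List.pairwise_cons.mp hp).1 x hx) h.1

-- a list equals its own ascending sort iff it is adjacently nondecreasing
theorem pv_sorted_asc_iff (xs : List Int) :
    xs = PySem.List.sorted xs (fun x => x) false ↔ List.IsChain (fun a b : Int => a ≤ b) xs := by
  constructor
  · intro h
    rw [h]
    exact (PySem.List.sorted_pairwise xs (fun x => x)).isChain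
  · intro h
    exact (PySem.List.sorted_eq_self_of_pairwise xs (fun x => x) (pv_chain_pw_le h)).symm

-- a list equals its own descending sort iff it is adjacently nonincreasing
theorem pv_sorted_desc_iff (xs : List Int) :
    xs = PySem.List.sorted xs (fun x => x) true ↔ List.IsChain (fun a b : Int => b ≤ a) xs := by
  constructor
  · intro h
    rw [h]
    exact (PySem.List.sorted_pairwise_rev xs (fun x => x)).isChain
  · intro h
    exact (PySem.List.sorted_rev_eq_self_of_pairwise xs (fun x => x) (pv_chain_pw_ge h)).symm

-- "some adjacent decrease" = "not equal to own ascending sort"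
theorem pv_anyLt (xs : List Int) :
    (List.zip xs (xs.drop 1)).any (fun p => decide (p.2 < p.1))
      = !(xs == PySem.List.sorted xs (fun x => x) false) := by
  have hch : (List.zip xs (xs.drop 1)).any (fun p => decide (p.2 < p.1))
      = !decide (List.IsChain (fun a b : Int => a ≤ b) xs) := by
    induction xs with
    | nil => simp
    | cons a t ih =>
      cases t with
      | nil => simp
      | cons b t' =>
        simp only [List.drop_succ_cons, List.drop_zero, List.zip_cons_cons, List.any_cons] at *
        rw [ih]
        by_cases h2 : List.IsChain (fun a b : Int => a ≤ b) (b :: t')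
        · by_cases h1 : b < a
          · simp [h1]
          · simp [h1, decide_eq_true h2, not_lt.mp h1]
        · simp [decide_eq_false h2]
  rw [hch]
  have : (xs == PySem.List.sorted xs (fun x => x) false)
      = decide (List.IsChain (fun a b : Int => a ≤ b) xs) := by
    by_cases h : List.IsChain (fun a b : Int => a ≤ b) xs
    · have he := (pv_sorted_asc_iff xs).mpr h
      rw [decide_eq_true h, beq_iff_eq]
      exact he
    · simp only [decide_eq_false h]
      rw [beq_eq_false_iff_ne]
      exact fun hc => h ((pv_sorted_asc_iff xs).mp hc)
  rw [this]

-- "some adjacent increase" = "not equal to own descending sort"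
theorem pv_anyGt (xs : List Int) :
    (List.zip xs (xs.drop 1)).any (fun p => decide (p.2 > p.1))
      = !(xs == PySem.List.sorted xs (fun x => x) true) := by
  have hch : (List.zip xs (xs.drop 1)).any (fun p => decide (p.2 > p.1))
      = !decide (List.IsChain (fun a b : Int => b ≤ a) xs) := by
    induction xs with
    | nil => simp
    | cons a t ih =>
      cases t with
      | nil => simp
      | cons b t' =>
        simp only [List.drop_succ_cons, List.drop_zero, List.zip_cons_cons, List.any_cons] at *
        rw [ih]
        by_cases h2 : List.IsChain (fun a b : Int => b ≤ a) (b :: t')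
        · by_cases h1 : a < b
          · simp [h1]
          · simp [h1, decide_eq_true h2, not_lt.mp h1]
        · simp [decide_eq_false h2]
  rw [hch]
  have : (xs == PySem.List.sorted xs (fun x => x) true)
      = decide (List.IsChain (fun a b : Int => b ≤ a) xs) := by
    by_cases h : List.IsChain (fun a b : Int => b ≤ a) xs
    · have he := (pv_sorted_desc_iff xs).mpr h
      rw [decide_eq_true h, beq_iff_eq]
      exact he
    · simp only [decide_eq_false h]
      rw [beq_eq_false_iff_ne]
      exact fun hc => h ((pv_sorted_desc_iff xs).mp hc)
  rw [this]

-- number of value changes along t, starting from previous value l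
def pvChanges (l : Int) : List Int → Nat
  | [] => 0
  | x :: t => if x = l then pvChanges l t else 1 + pvChanges x t

theorem pvChanges_le (l : Int) (t : List Int) : pvChanges l t ≤ t.length := by
  induction t generalizing l with
  | nil => simp [pvChanges]
  | cons x t ih =>
    by_cases h : x = l <;> simp [pvChanges, h]
    · exact Nat.le_succ_of_le (ih l)
    · have := ih x; omega

-- "fewer changes than pairs" = "some adjacent pair equal"
theorem pvChanges_any (t : List Int) (a : Int) :
    decide (pvChanges a t < t.length)
      = (List.zip (a :: t) t).any (fun p => p.2 == p.1) := by
  induction t generalizing a with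
  | nil => simp [pvChanges]
  | cons b t' ih =>
    by_cases h : b = a
    · have hle := pvChanges_le a t'
      have h1 : pvChanges a (b :: t') = pvChanges a t' := by simp [pvChanges, h]
      rw [List.zip_cons_cons, List.any_cons, h1]
      have h2 : (((a, b).2 : Int) == (a, b).1) = true := by simp [h]
      rw [h2, Bool.true_or, List.length_cons,
        decide_eq_true (by omega : pvChanges a t' < t'.length + 1)]
    · have hch : pvChanges a (b :: t') = 1 + pvChanges b t' := by simp [pvChanges, h]
      rw [List.zip_cons_cons, List.any_cons, hch]
      have h2 : (((a, b).2 : Int) == (a, b).1) = false := by simp [h]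
      rw [h2, Bool.false_or, List.length_cons,
        show (decide (1 + pvChanges b t' < t'.length + 1)) = decide (pvChanges b t' < t'.length) from
          decide_eq_decide.mpr (by omega)]
      exact ih b

-- B's run-deduplication fold counts 1 + the number of value changes
theorem pv_runs_fold (t : List Int) : ∀ (acc : List Int) (l : Int), acc ≠ [] → acc.getLast? = some l →
    (t.foldl
      (fun (runs : List Int) x =>
        if runs == [] || !(PySem.List.pyGetD runs (-1) 0 == x) then runs ++ [x] else runs)
      acc).length = acc.length + pvChanges l t := by
  induction t with
  | nil =>
    intro acc l _ _
    simp [pvChanges]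
  | cons x t ih =>
    intro acc l hne hlast
    have hbeq : (acc == ([] : List Int)) = false := by
      rw [beq_eq_false_iff_ne]; exact hne
    have hget : PySem.List.pyGetD acc (-1) 0 = l := by
      rcases List.getLast?_eq_some_iff.mp hlast with ⟨ys, rfl⟩
      simp [PySem.List.pyGetD, PySem.List.pyGet?, PySem.List.pyIdx?]
    have hstep : (if acc == [] || !(PySem.List.pyGetD acc (-1) 0 == x) then acc ++ [x] else acc)
        = if x = l then acc else acc ++ [x] := by
      rw [hbeq, hget]
      by_cases h : x = l
      · simp [h]
      · have hlx : (l == x) = false := by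
          rw [beq_eq_false_iff_ne]; exact fun hc => h hc.symm
        simp [h, hlx]
    rw [List.foldl_cons, hstep]
    by_cases h : x = l
    · rw [if_pos h, ih acc l hne hlast]
      subst h
      simp [pvChanges]
    · rw [if_neg h, ih (acc ++ [x]) x (by simp) (by simp)]
      simp [pvChanges, h]
      omega

-- ===== VERDICT =====
theorem check_growth_spec : Claim_equal_check_growth := by
  intro history _ hpre
  obtain ⟨a, b, t, rfl⟩ : ∃ a b t, history = a :: b :: t := by
    match history with
    | [] => simp [Pre_check_growth] at hpre
    | [a] => simp [Pre_check_growth] at hpre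
    | a :: b :: t => exact ⟨a, b, t, rfl⟩
  unfold Spec_check_growth check_growth check_growth_alt
  have hget0 : PySem.List.pyGetD (a :: b :: t) (0 : Int) 0 = a := by
    simp [PySem.List.pyGetD, PySem.List.pyGet?, PySem.List.pyIdx?,
      show ((0 : Int) ≤ (t.length : Int) + 1) from by omega]
  have hget1 : PySem.List.pyGetD (a :: b :: t) (1 : Int) 0 = b := by
    simp [PySem.List.pyGetD, PySem.List.pyGet?, PySem.List.pyIdx?]
  rw [hget0, hget1]
  have hfold :
      (PySem.List.pyRange 2 ((a :: b :: t).length : Int) 1).foldl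
        (fun (s : Bool × Bool × Bool) x =>
          let hx := PySem.List.pyGetD (a :: b :: t) x 0
          let hp := PySem.List.pyGetD (a :: b :: t) (x - 1) 0
          if hx > hp then (true, s.2.1, s.2.2)
          else if hx == hp then (s.1, true, s.2.2)
          else if hx < hp then (s.1, s.2.1, true)
          else s)
        (false, b == a, decide (b < a))
      = ((List.zip ((a :: b :: t).drop 1) ((a :: b :: t).drop 2)).foldl
          (fun (s : Bool × Bool × Bool) (p : Int × Int) =>
            if p.2 > p.1 then (true, s.2.1, s.2.2)
            else if p.2 == p.1 then (s.1, true, s.2.2)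
            else if p.2 < p.1 then (s.1, s.2.1, true)
            else s)
          (false, b == a, decide (b < a))) := by
    rw [← pv_pairs_eq (a :: b :: t), List.foldl_map]
  rw [hfold]
  have hdrop1 : (a :: b :: t).drop 1 = b :: t := rfl
  have hdrop2 : (a :: b :: t).drop 2 = t := rfl
  rw [hdrop1, hdrop2, pv_fold_any]
  have hsl : PySem.List.slice (a :: b :: t) (some 1) none = b :: t := by
    simpa using PySem.List.slice_from_natCast (a :: b :: t) 1
  show _ = (_, _, _)
  rw [hsl]
  refine Prod.ext ?_ (Prod.ext ?_ ?_)
  · -- up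
    show (false || (List.zip (b :: t) t).any (fun p => decide (p.2 > p.1)))
        = !((b :: t) == PySem.List.sorted (b :: t) (fun x => x) true)
    rw [Bool.false_or, ← pv_anyGt (b :: t)]
    rfl
  · -- flat
    show ((b == a) || (List.zip (b :: t) t).any (fun p => p.2 == p.1))
        = decide (((a :: b :: t).foldl
            (fun (runs : List Int) x =>
              if runs == [] || !(PySem.List.pyGetD runs (-1) 0 == x) then runs ++ [x] else runs)
            []).length < (a :: b :: t).length)
    have hruns : ((a :: b :: t).foldl
        (fun (runs : List Int) x =>
          if runs == [] || !(PySem.List.pyGetD runs (-1) 0 == x) then runs ++ [x] else runs)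
        []).length = 1 + pvChanges a (b :: t) := by
      rw [List.foldl_cons,
        show (if ([] : List Int) == [] || !(PySem.List.pyGetD [] (-1) 0 == a)
              then ([] : List Int) ++ [a] else []) = [a] from by simp]
      exact pv_runs_fold (b :: t) [a] a (by simp) (by simp)
    rw [hruns,
      show decide (1 + pvChanges a (b :: t) < (a :: b :: t).length)
          = decide (pvChanges a (b :: t) < (b :: t).length) from
        decide_eq_decide.mpr (by simp; omega),
      pvChanges_any (b :: t) a]
    rw [List.zip_cons_cons, List.any_cons]
  · -- fall
    show (decide (b < a) || (List.zip (b :: t) t).any (fun p => decide (p.2 < p.1)))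
        = !((a :: b :: t) == PySem.List.sorted (a :: b :: t) (fun x => x) false)
    rw [← pv_anyLt (a :: b :: t)]
    rfl
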